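-- pv_equiv track=rewrite | github.com/pc5401/my_BOJ | 백준/Bronze/17206. 준석이의 수학 숙제/준석이의 수학 숙제.py | solve
-- ===== SOURCE A (Python) =====
-- def solve(n: int) -> int:
--     rtn = [0] * (n+1)
--
--     for i in range(1, n+1):
--         if i % 7 == 0:
--             rtn[i] = rtn[i-1] + i
--             continue
--
--         if i % 3 == 0:
--             rtn[i] = rtn[i-1] + i
--             continue
--
--         rtn[i] = rtn[i-1]
--
--     return rtn
-- ===== SOURCE B (Python) =====
-- def solve(n: int) -> int:
--     # Closed form per index: sum of multiples of 3 or 7 up to i, by inclusion-exclusion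
--     # over triangular numbers; no running accumulator.
--     def tri(k):
--         return k * (k + 1) // 2
--     return [3 * tri(i // 3) + 7 * tri(i // 7) - 21 * tri(i // 21)
--             for i in range(0, n + 1)]
-- ===== Notes on version B (the rewrite author's own statement) =====
-- stated objective: alternative
-- what changed: Replaces A's running prefix-sum array (each entry copied/extended from the previous one) with an independent closed form per index: prefix_sum(i) = 3*T(i//3) + 7*T(i//7) - 21*T(i//21) via triangular numbers and inclusion-exclusion, emitted by a single comprehension.
import Mathlib
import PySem

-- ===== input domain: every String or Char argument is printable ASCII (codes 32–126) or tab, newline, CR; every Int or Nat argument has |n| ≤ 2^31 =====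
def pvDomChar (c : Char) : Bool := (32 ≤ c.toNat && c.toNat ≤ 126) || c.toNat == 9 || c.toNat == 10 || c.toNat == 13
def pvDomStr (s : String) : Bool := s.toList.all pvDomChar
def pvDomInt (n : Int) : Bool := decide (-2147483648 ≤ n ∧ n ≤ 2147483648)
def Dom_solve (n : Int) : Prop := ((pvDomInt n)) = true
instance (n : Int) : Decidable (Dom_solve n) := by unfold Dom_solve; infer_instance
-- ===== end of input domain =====

-- B replaces A's running prefix-sum array with an independent closed form per index
-- (inclusion-exclusion over triangular numbers); objective: alternative algorithm, same cost.

-- ===== PORT A =====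
-- rtn[i] = … / rtn[i-1]: inside the loop 1 ≤ i ≤ n < len(rtn), so List.set i.toNat and
-- pyGetD (i-1) are exact (no negative index or IndexError is reachable).
def solve (n : Int) : List Int :=
  (PySem.List.pyRange 1 (n + 1) 1).foldl
    (fun rtn i =>
      if PySem.Int.mod i 7 = 0 then rtn.set i.toNat (PySem.List.pyGetD rtn (i - 1) 0 + i)
      else if PySem.Int.mod i 3 = 0 then rtn.set i.toNat (PySem.List.pyGetD rtn (i - 1) 0 + i)
      else rtn.set i.toNat (PySem.List.pyGetD rtn (i - 1) 0))
    (List.replicate (n + 1).toNat 0)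

-- ===== PORT B =====
def pvTri (k : Int) : Int := PySem.Int.floordiv (k * (k + 1)) 2

def pvS (i : Int) : Int :=
  3 * pvTri (PySem.Int.floordiv i 3) + 7 * pvTri (PySem.Int.floordiv i 7)
    - 21 * pvTri (PySem.Int.floordiv i 21)

def solve_alt (n : Int) : List Int :=
  (PySem.List.pyRange 0 (n + 1) 1).map pvS

-- ===== PRECONDITION & SPEC =====
def Spec_solve (n : Int) (out : List Int) : Prop := out = solve_alt n
instance (n : Int) (out : List Int) : Decidable (Spec_solve n out) := by unfold Spec_solve; infer_instance

-- ===== CLAIM (what is proved, stated in full; the proofs are below) =====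
def Claim_equal_solve : Prop := ∀ (n : Int), Dom_solve n → Spec_solve n (solve n)

-- ===== LEMMAS AND PROOFS =====

theorem pvTri_succ (k : Int) : pvTri (k + 1) = pvTri k + (k + 1) := by
  unfold pvTri
  rw [PySem.Int.floordiv_eq_ediv_of_pos (by norm_num),
      PySem.Int.floordiv_eq_ediv_of_pos (by norm_num)]
  obtain ⟨t, ht⟩ := Int.even_mul_succ_self k
  have h1 : k * (k + 1) = 2 * t := by omega
  have h2 : (k + 1) * (k + 1 + 1) = 2 * (t + (k + 1)) := by ring_nf; ring_nf at h1; omega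
  rw [h1, h2, Int.mul_ediv_cancel_left _ (by norm_num), Int.mul_ediv_cancel_left _ (by norm_num)]

theorem prime_step (p i : Int) (hp : 0 < p) :
    p * pvTri (PySem.Int.floordiv (i + 1) p)
      = p * pvTri (PySem.Int.floordiv i p) + (if PySem.Int.mod (i + 1) p = 0 then i + 1 else 0) := by
  rw [PySem.Int.floordiv_eq_ediv_of_pos hp, PySem.Int.floordiv_eq_ediv_of_pos hp,
      PySem.Int.mod_eq_emod_of_pos hp]
  have hq := Int.emod_add_mul_ediv i p
  have hr0 : 0 ≤ i % p := Int.emod_nonneg i (by omega)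
  have hrp : i % p < p := Int.emod_lt_of_pos i hp
  have hpm : p * (i / p + 1) = p * (i / p) + p := by ring
  by_cases hc : i % p = p - 1
  · have hdiv : (i + 1) / p = i / p + 1 ∧ (i + 1) % p = 0 :=
      (Int.ediv_emod_unique hp).2 ⟨by omega, by omega, by omega⟩
    rw [hdiv.1, hdiv.2, pvTri_succ, if_pos rfl]
    have hdist : p * (pvTri (i / p) + (i / p + 1)) = p * pvTri (i / p) + p * (i / p + 1) := by ring
    omega
  · have hdiv : (i + 1) / p = i / p ∧ (i + 1) % p = i % p + 1 :=
      (Int.ediv_emod_unique hp).2 ⟨by omega, by omega, by omega⟩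
    rw [hdiv.1, hdiv.2, if_neg (by omega)]
    omega

theorem pvS_succ (i : Int) :
    pvS (i + 1) = pvS i +
      (if PySem.Int.mod (i + 1) 7 = 0 then i + 1
       else if PySem.Int.mod (i + 1) 3 = 0 then i + 1 else 0) := by
  unfold pvS
  rw [prime_step 3 i (by norm_num), prime_step 7 i (by norm_num), prime_step 21 i (by norm_num)]
  have h3 := PySem.Int.mod_eq_emod_of_pos (a := i + 1) (b := 3) (by norm_num)
  have h7 := PySem.Int.mod_eq_emod_of_pos (a := i + 1) (b := 7) (by norm_num)
  have h21 := PySem.Int.mod_eq_emod_of_pos (a := i + 1) (b := 21) (by norm_num)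
  rw [h3, h7, h21]
  split_ifs <;> omega

-- the body of A's loop, named for the induction
def pvStep (rtn : List Int) (i : Int) : List Int :=
  if PySem.Int.mod i 7 = 0 then rtn.set i.toNat (PySem.List.pyGetD rtn (i - 1) 0 + i)
  else if PySem.Int.mod i 3 = 0 then rtn.set i.toNat (PySem.List.pyGetD rtn (i - 1) 0 + i)
  else rtn.set i.toNat (PySem.List.pyGetD rtn (i - 1) 0)

theorem solve_eq_foldl_pvStep (n : Int) :
    solve n = (PySem.List.pyRange 1 (n + 1) 1).foldl pvStep (List.replicate (n + 1).toNat 0) := rfl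

theorem length_map_pyRange_zero (m : Nat) :
    ((PySem.List.pyRange 0 ((m : Int) + 1) 1).map pvS).length = m + 1 := by
  rw [List.length_map, PySem.List.length_pyRange_one]
  omega

theorem getD_map_pyRange_last (m : Nat) :
    ((PySem.List.pyRange 0 ((m : Int) + 1) 1).map pvS).getD m 0 = pvS m := by
  have hlen := length_map_pyRange_zero m
  have hm : m < ((PySem.List.pyRange 0 ((m : Int) + 1) 1).map pvS).length := by omega
  rw [List.getD_eq_getElem _ _ hm, List.getElem_map, PySem.List.getElem_pyRange_one]
  norm_num

theorem main_invariant (m k : Nat) :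
    (PySem.List.pyRange 1 ((m : Int) + 1) 1).foldl pvStep (List.replicate (m + 1 + k) (0 : Int))
      = (PySem.List.pyRange 0 ((m : Int) + 1) 1).map pvS ++ List.replicate k (0 : Int) := by
  induction m generalizing k with
  | zero =>
      rw [PySem.List.pyRange_one_eq_nil (by norm_num), List.foldl_nil]
      have h1 : PySem.List.pyRange 0 ((↑(0 : Nat) : Int) + 1) 1 = [(0 : Int)] := by decide
      rw [h1, List.map_singleton, show pvS 0 = 0 from by decide, Nat.add_comm 1 k,
          List.replicate_succ, List.singleton_append]
  | succ m ih =>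
      have hrange : PySem.List.pyRange 1 ((↑(m + 1) : Int) + 1) 1
          = PySem.List.pyRange 1 ((m : Int) + 1) 1 ++ [((m : Int) + 1)] := by
        have : ((↑(m + 1) : Int) + 1) = ((m : Int) + 1) + 1 := by push_cast; ring
        rw [this, PySem.List.pyRange_one_succ_right (by omega)]
      have hrep : m + 1 + 1 + k = m + 1 + (k + 1) := by omega
      rw [hrange, List.foldl_append, hrep, ih (k + 1)]
      -- evaluate one step at i = m + 1
      set L := (PySem.List.pyRange 0 ((m : Int) + 1) 1).map pvS with hL
      have hlen : L.length = m + 1 := length_map_pyRange_zero m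
      have hget : PySem.List.pyGetD (L ++ List.replicate (k + 1) (0 : Int)) ((m : Int) + 1 - 1) 0
          = pvS m := by
        have h1 : (0 : Int) ≤ (m : Int) + 1 - 1 := by omega
        rw [PySem.List.pyGetD_of_nonneg _ _ h1]
        have h2 : ((m : Int) + 1 - 1).toNat = m := by omega
        rw [h2, List.getD_append _ _ _ _ (by omega)]
        exact getD_map_pyRange_last m
      have hsetfn : ∀ v : Int,
          (L ++ List.replicate (k + 1) (0 : Int)).set ((m : Int) + 1).toNat v
            = (L ++ [v]) ++ List.replicate k (0 : Int) := by
        intro v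
        have h2 : ((m : Int) + 1).toNat = m + 1 := by omega
        rw [h2, List.replicate_succ, List.set_append]
        simp [hlen]
      have hrhs : (PySem.List.pyRange 0 ((↑(m + 1) : Int) + 1) 1).map pvS
          = L ++ [pvS ((m : Int) + 1)] := by
        have : ((↑(m + 1) : Int) + 1) = ((m : Int) + 1) + 1 := by push_cast; ring
        rw [this, PySem.List.pyRange_one_succ_right (by omega), List.map_append, List.map_singleton]
      rw [hrhs]
      simp only [List.foldl_cons, List.foldl_nil]
      unfold pvStep
      rw [hget]
      have hS := pvS_succ (m : Int)
      split_ifs at hS ⊢ <;> rw [hsetfn, hS] <;> simp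

-- ===== VERDICT (by name: the statement is the Claim_ definition above) =====
theorem solve_spec : Claim_equal_solve := by
  intro n _
  unfold Spec_solve solve_alt
  rw [solve_eq_foldl_pvStep]
  by_cases hn : 0 ≤ n
  · have hm : n = ((n.toNat : Nat) : Int) := by omega
    rw [hm]
    have h1 : ((n.toNat : Int) + 1).toNat = n.toNat + 1 + 0 := by omega
    rw [h1]
    exact (main_invariant n.toNat 0).trans (by simp)
  · rw [PySem.List.pyRange_one_eq_nil (by omega), PySem.List.pyRange_one_eq_nil (by omega)]
    simp
    omega
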